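-- pv_equiv track=rewrite | github.com/mihinduk/VICAST | vicast-analyze/generate_consensus_genome.py | mask_low_coverage_from_array
-- ===== SOURCE A (Python) =====
-- def mask_low_coverage_from_array(consensus_seq, min_depth, depth_array):
--     """Mask positions with coverage < min_depth using a pre-loaded depth array.
--
--     Returns (masked_seq, n_count, list of masked regions as (start, end) 1-based).
--     """
--     seq_list = list(consensus_seq)
--     genome_len = len(seq_list)
--     n_count = 0
--     masked_regions = []
--     in_region = False
--     region_start = None
--
--     for i in range(genome_len):
--         if i < len(depth_array) and depth_array[i] < min_depth:
--             seq_list[i] = 'N'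
--             n_count += 1
--             if not in_region:
--                 region_start = i + 1
--                 in_region = True
--         else:
--             if in_region:
--                 masked_regions.append((region_start, i))
--                 in_region = False
--
--     if in_region:
--         masked_regions.append((region_start, genome_len))
--
--     return ''.join(seq_list), n_count, masked_regions
-- ===== SOURCE B (Python) =====
-- def mask_low_coverage_from_array(consensus_seq, min_depth, depth_array):
--     """Mask positions with coverage < min_depth using a pre-loaded depth array.
--
--     Returns (masked_seq, n_count, list of masked regions as (start, end) 1-based).
--     Three-pass version: a precomputed boolean mask, join+sum, then run-skipping
--     region detection instead of A's single fused scan with an in_region flag.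
--     """
--     n = len(consensus_seq)
--     mask = [i < len(depth_array) and depth_array[i] < min_depth
--             for i in range(n)]
--     masked_seq = ''.join('N' if m else c for m, c in zip(mask, consensus_seq))
--     n_count = sum(mask)
--     regions = []
--     i = 0
--     while i < n:
--         if mask[i]:
--             j = i + 1
--             while j < n and mask[j]:
--                 j += 1
--             regions.append((i + 1, j))
--             i = j
--         else:
--             i += 1
--     return masked_seq, n_count, regions
-- ===== Notes on version B (the rewrite author's own statement) =====
-- stated objective: alternative
-- what changed: Replaced A's single fused stateful scan (in-place char mutation plus an in_region flag and region_start variable) by three separate passes: a precomputed boolean mask, a zip/join for the sequence and sum for the N count, and a run-skipping two-index loop for the regions.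
import Mathlib
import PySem

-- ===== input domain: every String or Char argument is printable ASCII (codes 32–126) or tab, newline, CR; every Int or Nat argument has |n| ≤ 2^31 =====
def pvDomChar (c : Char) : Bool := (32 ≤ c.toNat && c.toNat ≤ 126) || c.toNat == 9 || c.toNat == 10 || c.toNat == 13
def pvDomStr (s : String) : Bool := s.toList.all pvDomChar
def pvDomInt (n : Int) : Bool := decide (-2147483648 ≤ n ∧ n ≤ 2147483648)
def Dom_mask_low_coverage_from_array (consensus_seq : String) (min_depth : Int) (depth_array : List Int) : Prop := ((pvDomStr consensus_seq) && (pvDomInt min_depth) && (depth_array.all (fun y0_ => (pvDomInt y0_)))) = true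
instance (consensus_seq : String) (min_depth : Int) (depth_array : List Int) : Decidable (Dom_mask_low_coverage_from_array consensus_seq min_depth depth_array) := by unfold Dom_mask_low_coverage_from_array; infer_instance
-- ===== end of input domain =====

-- B replaces A's single fused stateful scan (in-place mutation + in_region flag) by three
-- passes: a precomputed boolean mask, zip/join + sum, and run-skipping region detection;
-- same cost, different structure (objective: alternative).

-- ===== PORT A =====
-- shared guard: Python's 'i < len(depth_array) and depth_array[i] < min_depth'
-- (getD is exact here: the index is only read under the bounds guard)
def lowCov (depth_array : List Int) (min_depth : Int) (i : Nat) : Bool :=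
  decide (i < depth_array.length) && decide (depth_array.getD i 0 < min_depth)

-- A's loop state: (seq_list, n_count, masked_regions, in_region, region_start)
-- region_start is Python's None → Option Int; it is only read (getD 0) when in_region is true.
def stepA (min_depth : Int) (depth_array : List Int)
    (st : List Char × Int × List (Int × Int) × Bool × Option Int) (i : Nat) :
    List Char × Int × List (Int × Int) × Bool × Option Int :=
  let (sq, c, r, inR, rs) := st
  if lowCov depth_array min_depth i then
    (sq.set i 'N', c + 1, r, true, if inR then rs else some ((i : Int) + 1))
  else
    (sq, c, (if inR then r ++ [(rs.getD 0, (i : Int))] else r), false, rs)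

def finA (st : List Char × Int × List (Int × Int) × Bool × Option Int)
    (genome_len : Nat) : String × Int × (List (Int × Int)) :=
  let (sq, c, r, inR, rs) := st
  (String.mk sq, c, if inR then r ++ [(rs.getD 0, (genome_len : Int))] else r)

def mask_low_coverage_from_array (consensus_seq : String) (min_depth : Int) (depth_array : List Int) : String × Int × (List (Int × Int)) :=
  let seq_list := consensus_seq.toList
  let genome_len := seq_list.length
  finA ((List.range genome_len).foldl (stepA min_depth depth_array)
    (seq_list, 0, [], false, none)) genome_len

-- ===== PORT B =====
-- B's run-skipping region detection: at a True bit, consume the whole run at once.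
def regionsOf : List Bool → Nat → List (Int × Int)
  | [], _ => []
  | false :: t, i => regionsOf t (i + 1)
  | true :: t, i =>
      (((i : Int) + 1), ((i : Int) + 1 + (t.takeWhile id).length)) ::
        regionsOf (t.dropWhile id) (i + 1 + (t.takeWhile id).length)
  termination_by m _ => m.length
  decreasing_by
  · simp
  · have h := List.length_dropWhile_le (p := id) (l := t); simp; omega

def mask_low_coverage_from_array_alt (consensus_seq : String) (min_depth : Int) (depth_array : List Int) : String × Int × (List (Int × Int)) :=
  let cs := consensus_seq.toList
  let n := cs.length
  let mask := (List.range n).map (lowCov depth_array min_depth)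
  let masked := String.mk ((List.zip mask cs).map (fun p => if p.1 then 'N' else p.2))
  let n_count : Int := (mask.count true : Nat)
  (masked, n_count, regionsOf mask 0)

-- ===== PRECONDITION & SPEC =====
def Spec_mask_low_coverage_from_array (consensus_seq : String) (min_depth : Int) (depth_array : List Int) (out : String × Int × (List (Int × Int))) : Prop := out = mask_low_coverage_from_array_alt consensus_seq min_depth depth_array
instance (consensus_seq : String) (min_depth : Int) (depth_array : List Int) (out : String × Int × (List (Int × Int))) : Decidable (Spec_mask_low_coverage_from_array consensus_seq min_depth depth_array out) := by unfold Spec_mask_low_coverage_from_array; infer_instance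

-- ===== CLAIM (what is proved, stated in full; the proofs are below) =====
def Claim_equal_mask_low_coverage_from_array : Prop := ∀ (consensus_seq : String) (min_depth : Int) (depth_array : List Int), Dom_mask_low_coverage_from_array consensus_seq min_depth depth_array → Spec_mask_low_coverage_from_array consensus_seq min_depth depth_array (mask_low_coverage_from_array consensus_seq min_depth depth_array)

-- ===== LEMMAS AND PROOFS =====

-- ===== VERDICT (by name: the statement is the Claim_ definition above) =====
-- loopSim: A's loop re-expressed as structural recursion over the mask bits (proof device)
def loopSim : List Bool → Nat → List Char → Int → List (Int × Int) → Bool → Option Int →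
    String × Int × (List (Int × Int))
  | [], i, sq, c, r, inR, rs =>
      (String.mk sq, c, if inR then r ++ [(rs.getD 0, (i : Int))] else r)
  | b :: t, i, sq, c, r, inR, rs =>
      if b then
        loopSim t (i + 1) (sq.set i 'N') (c + 1) r true (if inR then rs else some ((i : Int) + 1))
      else
        loopSim t (i + 1) sq c (if inR then r ++ [(rs.getD 0, (i : Int))] else r) false rs

-- an open region with recorded start v, remaining bits m at 0-based index i
def regionsOpen (v : Int) (m : List Bool) (i : Nat) : List (Int × Int) :=
  (v, ((i : Int) + (m.takeWhile id).length)) ::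
    regionsOf (m.dropWhile id) (i + (m.takeWhile id).length)

lemma foldl_to_loopSim (min_depth : Int) (depth_array : List Int) :
    ∀ (len k : Nat) sq c r inR rs,
    finA ((List.range' k len).foldl (stepA min_depth depth_array) (sq, c, r, inR, rs)) (k + len)
      = loopSim ((List.range' k len).map (lowCov depth_array min_depth)) k sq c r inR rs := by
  intro len
  induction len with
  | zero => intro k sq c r inR rs; simp [finA, loopSim]
  | succ n ih =>
      intro k sq c r inR rs
      rw [List.range'_succ]
      by_cases h : lowCov depth_array min_depth k
      · simp only [List.foldl_cons, List.map_cons, stepA, h, if_true, loopSim]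
        rw [show k + (n + 1) = (k + 1) + n by omega]
        exact ih (k + 1) (sq.set k 'N') (c + 1) r true (if inR then rs else some ((k : Int) + 1))
      · simp only [List.foldl_cons, List.map_cons, stepA, h, if_false, loopSim,
          Bool.false_eq_true]
        rw [show k + (n + 1) = (k + 1) + n by omega]
        exact ih (k + 1) sq c (if inR then r ++ [(rs.getD 0, (k : Int))] else r) false rs

lemma loopSim_fst : ∀ (m : List Bool) (i : Nat) (sq : List Char) c r inR rs,
    sq.length = i + m.length →
    (loopSim m i sq c r inR rs).1
      = String.mk (sq.take i ++ (List.zip m (sq.drop i)).map (fun p => if p.1 then 'N' else p.2)) := by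
  intro m
  induction m with
  | nil =>
      intro i sq c r inR rs h
      have ht : sq.take i = sq := List.take_of_length_le (by simp at h; omega)
      simp [loopSim, ht]
  | cons b t ih =>
      intro i sq c r inR rs h
      have hi : i < sq.length := by simp at h; omega
      have hdrop : sq.drop i = sq[i] :: sq.drop (i + 1) := (List.getElem_cons_drop hi).symm
      cases b with
      | true =>
          simp only [loopSim, if_true]
          rw [ih (i+1) (sq.set i 'N') (c+1) r true
            (if inR = true then rs else some ((i : Int) + 1)) (by simp at h ⊢; omega)]
          congr 1
          rw [List.drop_set_of_lt (by omega), List.take_add_one,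
              List.getElem?_eq_getElem (by simp; omega), List.getElem_set_self,
              List.take_set_of_le (by omega), hdrop]
          simp only [List.zip_cons_cons, List.map_cons, Option.toList_some, List.append_assoc,
            List.cons_append, List.nil_append, if_true]
      | false =>
          simp only [loopSim, Bool.false_eq_true, if_false]
          rw [ih (i+1) sq c (if inR = true then r ++ [(rs.getD 0, (i : Int))] else r) false rs
            (by simp at h ⊢; omega)]
          congr 1
          rw [hdrop, List.take_add_one, List.getElem?_eq_getElem hi]
          simp only [List.zip_cons_cons, List.map_cons, Option.toList_some, List.append_assoc,
            List.cons_append, List.nil_append, Bool.false_eq_true, if_false]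

lemma loopSim_cnt : ∀ (m : List Bool) (i : Nat) sq c r inR rs,
    (loopSim m i sq c r inR rs).2.1 = c + (m.count true : Nat) := by
  intro m
  induction m with
  | nil => intro i sq c r inR rs; simp [loopSim]
  | cons b t ih =>
      intro i sq c r inR rs
      cases b with
      | true => simp only [loopSim, if_true]; rw [ih]; simp; ring
      | false => simp only [loopSim, Bool.false_eq_true, if_false]; rw [ih]; simp

lemma loopSim_regions : ∀ (m : List Bool) (i : Nat) sq c r,
    (∀ rs, (loopSim m i sq c r false rs).2.2 = r ++ regionsOf m i) ∧
    (∀ rs : Option Int, (loopSim m i sq c r true rs).2.2 = r ++ regionsOpen (rs.getD 0) m i) := by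
  intro m
  induction m with
  | nil =>
      intro i sq c r
      constructor <;> intro rs <;> simp [loopSim, regionsOf, regionsOpen]
  | cons b t ih =>
      intro i sq c r
      cases b with
      | true =>
          constructor <;> intro rs
          · simp only [loopSim, if_true, Bool.false_eq_true, if_false]
            rw [(ih (i+1) (sq.set i 'N') (c+1) r).2 (some ((i : Int) + 1))]
            simp [regionsOf, regionsOpen]
          · simp only [loopSim, if_true]
            rw [(ih (i+1) (sq.set i 'N') (c+1) r).2 rs]
            simp [regionsOpen, List.takeWhile, List.dropWhile, id]
            exact ⟨by ring, by congr 1; omega⟩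
      | false =>
          constructor <;> intro rs
          · simp only [loopSim, Bool.false_eq_true, if_false]
            rw [(ih (i+1) sq c r).1 rs]
            simp [regionsOf]
          · simp only [loopSim, Bool.false_eq_true, if_false, if_true]
            rw [(ih (i+1) sq c (r ++ [(rs.getD 0, (i : Int))])).1 rs]
            simp [regionsOpen, regionsOf, List.takeWhile, List.dropWhile, id]

lemma loop_eq (min_depth : Int) (depth_array : List Int) (sq : List Char) :
    finA ((List.range sq.length).foldl (stepA min_depth depth_array) (sq, 0, [], false, none))
      sq.length
      = loopSim ((List.range sq.length).map (lowCov depth_array min_depth)) 0 sq 0 [] false none := by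
  have h := foldl_to_loopSim min_depth depth_array sq.length 0 sq 0 [] false none
  simpa [List.range_eq_range'] using h

theorem mask_low_coverage_from_array_spec : Claim_equal_mask_low_coverage_from_array := by
  intro consensus_seq min_depth depth_array _
  unfold Spec_mask_low_coverage_from_array
  simp only [mask_low_coverage_from_array, mask_low_coverage_from_array_alt]
  rw [loop_eq]
  set cs := consensus_seq.toList with hcs
  set M := (List.range cs.length).map (lowCov depth_array min_depth) with hM
  have hMlen : M.length = cs.length := by simp [hM]
  refine Prod.ext ?_ (Prod.ext ?_ ?_)
  · rw [loopSim_fst M 0 cs 0 [] false none (by omega)]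
    simp
  · rw [loopSim_cnt]; simp
  · rw [(loopSim_regions M 0 cs 0 []).1 none]; simp
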